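-- pv_equiv track=rewrite | github.com/0xInfection/TIDoS-Framework | core/lib/mechanize/_urllib2_fork.py | parse_http_list
-- ===== SOURCE A (Python) =====
-- def parse_http_list(s):
--     """Parse lists as described by RFC 2068 Section 2.
--
--     In particular, parse comma-separated lists where the elements of
--     the list may include quoted-strings.  A quoted-string could
--     contain a comma.  A non-quoted string could have quotes in the
--     middle.  Neither commas nor quotes count if they are escaped.
--     Only double-quotes count, not single-quotes.
--     """
--     res = []
--     part = ''
--
--     escape = quote = False
--     for cur in s:
--         if escape:
--             part += cur
--             escape = False
--             continue
--         if quote: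
--             if cur == '\\':
--                 escape = True
--                 continue
--             elif cur == '"':
--                 quote = False
--             part += cur
--             continue
--
--         if cur == ',':
--             res.append(part)
--             part = ''
--             continue
--
--         if cur == '"':
--             quote = True
--
--         part += cur
--
--     # append last part
--     if part:
--         res.append(part)
--
--     return list(filter(None, (part_.strip() for part_ in res)))
-- ===== SOURCE B (Python) =====
-- def parse_http_list(s):
--     """Index-based scanner: nested loop consumes quoted regions instead of
--     persistent escape/quote flags."""
--     res = []
--     part = []
--     i = 0
--     n = len(s)
--     while i < n:
--         cur = s[i]
--         if cur == '"':
--             part.append(cur)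
--             i += 1
--             while i < n:
--                 ch = s[i]
--                 if ch == '\\':
--                     i += 1
--                     if i < n:
--                         part.append(s[i])
--                         i += 1
--                 elif ch == '"':
--                     part.append(ch)
--                     i += 1
--                     break
--                 else:
--                     part.append(ch)
--                     i += 1
--         elif cur == ',':
--             res.append(''.join(part))
--             part = []
--             i += 1
--         else:
--             part.append(cur)
--             i += 1
--     if part:
--         res.append(''.join(part))
--     return list(filter(None, (p.strip() for p in res)))
-- ===== Notes on version B (the rewrite author's own statement) =====
-- stated objective: alternative
-- what changed: Replaced A's single flat loop with persistent escape/quote boolean flags by a two-level scanner: an outer loop over parts that, on '"', hands control to a nested quoted-region scan which consumes backslash-escaped characters pairwise and returns at the closing quote.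
import Mathlib
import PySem

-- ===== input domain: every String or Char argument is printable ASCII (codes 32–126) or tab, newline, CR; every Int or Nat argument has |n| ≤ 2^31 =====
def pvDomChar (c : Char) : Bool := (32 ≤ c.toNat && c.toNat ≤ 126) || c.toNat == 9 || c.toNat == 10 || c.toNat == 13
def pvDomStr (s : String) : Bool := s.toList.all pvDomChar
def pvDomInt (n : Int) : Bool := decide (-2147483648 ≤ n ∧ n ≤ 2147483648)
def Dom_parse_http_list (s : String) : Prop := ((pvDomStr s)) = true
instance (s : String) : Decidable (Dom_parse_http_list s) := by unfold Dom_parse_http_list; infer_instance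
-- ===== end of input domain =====

-- B replaces A's persistent escape/quote flags by an index-free nested scan of each
-- quoted region (objective: alternative decomposition, same cost).

-- ===== PORT A =====
-- A's for-loop over the characters with state (res, part, escape, quote); part is kept
-- as a List Char (Python string concatenation), pushed to res as a String.
def pvLoopA : List Char → List String → List Char → Bool → Bool → List String
  | [], res, part, _, _ => if part ≠ [] then res ++ [String.mk part] else res
  | c :: cs, res, part, escape, quote =>
    if escape then pvLoopA cs res (part ++ [c]) false quote
    else if quote then
      if c = '\\' then pvLoopA cs res part true quote
      else if c = '"' then pvLoopA cs res (part ++ [c]) false false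
      else pvLoopA cs res (part ++ [c]) false quote
    else if c = ',' then pvLoopA cs (res ++ [String.mk part]) [] escape quote
    else if c = '"' then pvLoopA cs res (part ++ [c]) escape true
    else pvLoopA cs res (part ++ [c]) escape quote

def parse_http_list (s : String) : List String :=
  ((pvLoopA s.toList [] [] false false).map PySem.Str.strip).filter (fun p => p ≠ "")

-- ===== PORT B =====
-- B's outer scan; a '"' enters the nested quoted-region scan pvQuoteB.
mutual
def pvOuterB : List Char → List Char → List String → List String
  | [], part, res => if part ≠ [] then res ++ [String.mk part] else res
  | c :: cs, part, res =>
    if c = '"' then pvQuoteB cs (part ++ [c]) res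
    else if c = ',' then pvOuterB cs [] (res ++ [String.mk part])
    else pvOuterB cs (part ++ [c]) res
termination_by cs _ _ => cs.length
-- nested scan of a quoted region: '\' consumes the following char literally,
-- an unescaped '"' returns to the outer scan; end of input falls through to the final push.
def pvQuoteB : List Char → List Char → List String → List String
  | [], part, res => if part ≠ [] then res ++ [String.mk part] else res
  | c :: cs, part, res =>
    if c = '\\' then
      match cs with
      | [] => if part ≠ [] then res ++ [String.mk part] else res
      | d :: cs' => pvQuoteB cs' (part ++ [d]) res
    else if c = '"' then pvOuterB cs (part ++ [c]) res
    else pvQuoteB cs (part ++ [c]) res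
termination_by cs _ _ => cs.length
decreasing_by all_goals simp
end

def parse_http_list_alt (s : String) : List String :=
  ((pvOuterB s.toList [] []).map PySem.Str.strip).filter (fun p => p ≠ "")

-- ===== PRECONDITION & SPEC =====
def Spec_parse_http_list (s : String) (out : List String) : Prop := out = parse_http_list_alt s
instance (s : String) (out : List String) : Decidable (Spec_parse_http_list s out) := by unfold Spec_parse_http_list; infer_instance

-- ===== CLAIM (what is proved, stated in full; the proofs are below) =====
def Claim_equal_parse_http_list : Prop := ∀ (s : String), Dom_parse_http_list s → Spec_parse_http_list s (parse_http_list s)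

-- ===== LEMMAS AND PROOFS =====
-- The flag states of A's loop correspond to B's two scanners:
-- (escape, quote) = (false, false) ↔ pvOuterB, (false, true) ↔ pvQuoteB;
-- the transient (true, true) state is exactly B's backslash lookahead.
lemma pvLoop_eq : ∀ (n : Nat) (cs : List Char), cs.length ≤ n → ∀ part res,
    pvLoopA cs res part false false = pvOuterB cs part res ∧
    pvLoopA cs res part false true = pvQuoteB cs part res := by
  intro n
  induction n with
  | zero =>
    intro cs h part res
    have : cs = [] := List.eq_nil_of_length_eq_zero (Nat.le_zero.mp h)
    subst this
    simp [pvLoopA, pvOuterB, pvQuoteB]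
  | succ n ih =>
    intro cs h part res
    cases cs with
    | nil => simp [pvLoopA, pvOuterB, pvQuoteB]
    | cons c cs =>
      have hcs : cs.length ≤ n := by simpa using h
      constructor
      · by_cases hq : c = '"'
        · subst hq
          simp only [pvLoopA, pvOuterB]
          norm_num
          exact (ih cs hcs _ res).2
        · by_cases hc : c = ','
          · subst hc
            simp only [pvLoopA, pvOuterB]
            norm_num
            exact (ih cs hcs _ _).1
          · simp only [pvLoopA, pvOuterB]
            simp only [if_neg, hc, hq, if_false, Bool.false_eq_true]
            norm_num [hc, hq]
            exact (ih cs hcs _ res).1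
      · by_cases hb : c = '\\'
        · subst hb
          rw [pvQuoteB.eq_def]
          simp only [pvLoopA]
          norm_num
          cases cs with
          | nil => simp [pvLoopA]
          | cons d cs' =>
            have hcs' : cs'.length ≤ n := by
              simp [List.length] at hcs ⊢; omega
            simp only [pvLoopA]
            norm_num
            exact (ih cs' hcs' _ res).2
        · by_cases hq : c = '"'
          · subst hq
            rw [pvQuoteB.eq_def]
            simp only [pvLoopA]
            norm_num
            exact (ih cs hcs _ res).1
          · rw [pvQuoteB.eq_def]
            simp only [pvLoopA]
            norm_num [hb, hq]
            exact (ih cs hcs _ res).2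

-- ===== VERDICT (by name: the statement is the Claim_ definition above) =====
theorem parse_http_list_spec : Claim_equal_parse_http_list := by
  intro s _
  unfold Spec_parse_http_list parse_http_list parse_http_list_alt
  rw [(pvLoop_eq s.toList.length s.toList le_rfl [] []).1]
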